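-- pv_equiv track=rewrite | github.com/williamzhao23/stonehenge | stonehenge.py | create_ley_row
-- ===== SOURCE A (Python) =====
-- from typing import List, Dict
--
-- def create_ley_row(board_size: int) -> List[List[int]]:
--     """
--     Return ley-lines along the horizontal rows given a board_size of
--     Stonehenge.
--
--     >>> create_ley_row(1)
--     [[0, 1], [2]]
--     >>> create_ley_row(3)
--     [[0, 1], [2, 3, 4], [5, 6, 7, 8], [9, 10, 11]]
--     """
--     ley_row = []
--     start = 0
--     for n in range(2, board_size + 2):
--         ley_row.append([n for n in range(start, start + n)])
--         start += n
--     ley_row.append([n for n in range(start, start + board_size)])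
--     return ley_row
-- ===== SOURCE B (Python) =====
-- def create_ley_row(board_size: int):
--     """Closed-form version: row i (0-based) has length i+2 and starts at
--     i*(i+3)//2 (= sum of lengths of rows 0..i-1); the final row starts at
--     board_size*(board_size+3)//2 and has length board_size."""
--     b = max(board_size, 0)
--     rows = [list(range(i * (i + 3) // 2, i * (i + 3) // 2 + i + 2)) for i in range(b)]
--     last = b * (b + 3) // 2
--     return rows + [list(range(last, last + board_size))]
-- ===== Notes on version B (the rewrite author's own statement) =====
-- stated objective: alternative
-- what changed: Replaces the running mutable start accumulator with the closed-form start offset i*(i+3)//2 per row, building each row independently by a comprehension over row indices.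
import Mathlib
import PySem

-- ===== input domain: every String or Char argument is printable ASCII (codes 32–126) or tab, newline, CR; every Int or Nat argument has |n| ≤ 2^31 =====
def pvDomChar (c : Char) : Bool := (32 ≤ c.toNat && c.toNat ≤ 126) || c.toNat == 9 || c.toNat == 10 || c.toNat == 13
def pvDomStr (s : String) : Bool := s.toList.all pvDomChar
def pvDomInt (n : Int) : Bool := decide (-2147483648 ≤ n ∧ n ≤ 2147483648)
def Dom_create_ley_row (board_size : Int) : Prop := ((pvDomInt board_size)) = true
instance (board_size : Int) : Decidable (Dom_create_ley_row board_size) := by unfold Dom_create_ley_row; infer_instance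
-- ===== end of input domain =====

-- B replaces A's running `start` accumulator by the closed-form start offset i*(i+3)//2 per row (alternative decomposition, same cost).


-- ===== PORT A =====
def create_ley_row (board_size : Int) : List (List Int) :=
  let st := (PySem.List.pyRange 2 (board_size + 2) 1).foldl
    (fun (st : List (List Int) × Int) n =>
      (st.1 ++ [PySem.List.pyRange st.2 (st.2 + n) 1], st.2 + n)) ([], 0)
  st.1 ++ [PySem.List.pyRange st.2 (st.2 + board_size) 1]

-- ===== PORT B =====
def pvStart (i : Int) : Int := PySem.Int.floordiv (i * (i + 3)) 2

def create_ley_row_alt (board_size : Int) : List (List Int) :=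
  let b := max board_size 0
  let rows := (PySem.List.pyRange 0 b 1).map
    (fun i => PySem.List.pyRange (pvStart i) (pvStart i + i + 2) 1)
  let last := pvStart b
  rows ++ [PySem.List.pyRange last (last + board_size) 1]

-- ===== PRECONDITION & SPEC =====
def Spec_create_ley_row (board_size : Int) (out : List (List Int)) : Prop := out = create_ley_row_alt board_size
instance (board_size : Int) (out : List (List Int)) : Decidable (Spec_create_ley_row board_size out) := by unfold Spec_create_ley_row; infer_instance

-- ===== CLAIM (what is proved, stated in full; the proofs are below) =====
def Claim_equal_create_ley_row : Prop := ∀ (board_size : Int), Dom_create_ley_row board_size → Spec_create_ley_row board_size (create_ley_row board_size)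

-- ===== LEMMAS AND PROOFS =====

theorem pvStart_succ (i : Int) (_hi : 0 ≤ i) : pvStart (i + 1) = pvStart i + (i + 2) := by
  unfold pvStart
  rw [PySem.Int.floordiv_eq_ediv_of_pos (by omega), PySem.Int.floordiv_eq_ediv_of_pos (by omega)]
  obtain ⟨t, ht⟩ : ∃ t, i * (i + 1) = t + t := (Int.even_mul_succ_self i)
  have he : i * (i + 3) = i * (i + 1) + 2 * i := by ring
  have hs : (i + 1) * (i + 1 + 3) = i * (i + 3) + 2 * (i + 2) := by ring
  omega

-- A's fold over the first m rows produces exactly B's mapped rows, with accumulator pvStart m.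
theorem pv_fold_eq (m : Nat) :
    (PySem.List.pyRange 2 ((m : Int) + 2) 1).foldl
      (fun (st : List (List Int) × Int) n =>
        (st.1 ++ [PySem.List.pyRange st.2 (st.2 + n) 1], st.2 + n)) ([], 0)
    = ((PySem.List.pyRange 0 (m : Int) 1).map
        (fun i => PySem.List.pyRange (pvStart i) (pvStart i + i + 2) 1),
       pvStart (m : Int)) := by
  induction m with
  | zero => decide
  | succ k ih =>
    have h1 : ((k + 1 : Nat) : Int) + 2 = ((k : Int) + 2) + 1 := by push_cast; ring
    have h2 : ((k + 1 : Nat) : Int) = (k : Int) + 1 := by push_cast; ring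
    rw [h1, PySem.List.pyRange_one_succ_right (by omega), List.foldl_append, ih,
        h2, PySem.List.pyRange_one_succ_right (by omega), List.map_append,
        pvStart_succ (k : Int) (by omega)]
    simp only [List.foldl_cons, List.foldl_nil, List.map_cons, List.map_nil, ← add_assoc]

-- ===== VERDICT (by name: the statement is the Claim_ definition above) =====
theorem create_ley_row_spec : Claim_equal_create_ley_row := by
  intro b _
  unfold Spec_create_ley_row create_ley_row create_ley_row_alt
  by_cases hb : 0 ≤ b
  · have hmax : max b 0 = b := by omega
    obtain ⟨m, rfl⟩ : ∃ m : Nat, b = (m : Int) := ⟨b.toNat, by omega⟩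
    rw [pv_fold_eq m, hmax]
  · have hmax : max b 0 = 0 := by omega
    rw [hmax, PySem.List.pyRange_one_eq_nil (a := 2) (b := b + 2) (by omega)]
    simp [pvStart, PySem.List.pyRange_zero]
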